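-- pv_equiv track=rewrite | github.com/jcranch/tilings | permutations.py | produce_permutable_plus_minus
-- ===== SOURCE A (Python) =====
-- def produce_permutable_plus_minus(permutable):
--     '''
--     Performs a given permutation on all in  set (+- a, +- b, +- c, +- d).
--     '''
--     list_of_results = []
--     for sgn1 in [-1,1]:
--         for sgn2 in [-1,1]:
--             for sgn3 in [-1,1]:
--                 for sgn4 in [-1,1]:
--                     considered_permutable = [permutable[0]*sgn1,permutable[1]*sgn2,permutable[2]*sgn3,permutable[3]*sgn4]
--                     list_of_results += [considered_permutable]
--     return list_of_results
-- ===== SOURCE B (Python) =====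
-- def produce_permutable_plus_minus(permutable):
--     '''
--     Performs a given permutation on all in  set (+- a, +- b, +- c, +- d).
--     '''
--     list_of_results = []
--     for i in range(16):
--         row = [permutable[k] * (1 if (i >> (3 - k)) & 1 else -1) for k in range(4)]
--         list_of_results.append(row)
--     return list_of_results
-- ===== Notes on version B (the rewrite author's own statement) =====
-- stated objective: alternative
-- what changed: Replaces the four nested sign loops with a single loop over range(16) that derives the four signs from the bits of the counter (bit 3 -> first sign, bit 0 -> last, 0 meaning -1), preserving the emission order.
import Mathlib
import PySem

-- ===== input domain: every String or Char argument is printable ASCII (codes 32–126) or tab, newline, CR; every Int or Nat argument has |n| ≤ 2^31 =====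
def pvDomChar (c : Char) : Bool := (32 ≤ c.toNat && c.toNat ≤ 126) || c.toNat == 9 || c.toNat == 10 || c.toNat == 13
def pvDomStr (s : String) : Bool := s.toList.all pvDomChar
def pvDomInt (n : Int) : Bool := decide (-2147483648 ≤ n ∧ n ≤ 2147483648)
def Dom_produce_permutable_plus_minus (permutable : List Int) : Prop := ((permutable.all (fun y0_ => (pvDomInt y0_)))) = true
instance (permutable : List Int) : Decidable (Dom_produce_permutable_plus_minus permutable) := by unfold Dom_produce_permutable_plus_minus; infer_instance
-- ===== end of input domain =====

-- B replaces the four nested sign loops by one pass over range(16), reading the four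
-- signs off the counter's bits (bit 3 = first sign, bit 0 = last, bit value 0 = -1),
-- which preserves A's emission order exactly.

-- ===== PORT A =====
-- four nested loops over [-1, 1]; indexing permutable[0..3] is exact under Pre_ (length ≥ 4)
def produce_permutable_plus_minus (permutable : List Int) : List (List Int) :=
  ([(-1 : Int), 1]).foldl (fun acc1 sgn1 =>
    ([(-1 : Int), 1]).foldl (fun acc2 sgn2 =>
      ([(-1 : Int), 1]).foldl (fun acc3 sgn3 =>
        ([(-1 : Int), 1]).foldl (fun acc4 sgn4 =>
          acc4 ++ [[PySem.List.pyGetD permutable 0 0 * sgn1,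
                    PySem.List.pyGetD permutable 1 0 * sgn2,
                    PySem.List.pyGetD permutable 2 0 * sgn3,
                    PySem.List.pyGetD permutable 3 0 * sgn4]]) acc3) acc2) acc1) []

-- ===== PORT B =====
-- (i >> (3-k)) & 1 for 0 ≤ i: shift = floor division by 2^(3-k), & 1 = mod 2 (exact here)
def pvBitSign (i k : Int) : Int :=
  if PySem.Int.mod (PySem.Int.floordiv i (2 ^ (3 - k).toNat)) 2 = 1 then 1 else -1

def produce_permutable_plus_minus_alt (permutable : List Int) : List (List Int) :=
  (PySem.List.pyRange 0 16 1).foldl (fun acc i =>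
    acc ++ [(PySem.List.pyRange 0 4 1).map
              (fun k => PySem.List.pyGetD permutable k 0 * pvBitSign i k)]) []

-- ===== PRECONDITION & SPEC =====
-- Pre_: the Python A indexes permutable[0..3] and raises IndexError on shorter lists
def Pre_produce_permutable_plus_minus (permutable : List Int) : Prop := 4 ≤ permutable.length
instance (permutable : List Int) : Decidable (Pre_produce_permutable_plus_minus permutable) := by unfold Pre_produce_permutable_plus_minus; infer_instance
def pvWitness_produce_permutable_plus_minus : List Int := [1, 2, 3, 4]

def Spec_produce_permutable_plus_minus (permutable : List Int) (out : List (List Int)) : Prop := out = produce_permutable_plus_minus_alt permutable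
instance (permutable : List Int) (out : List (List Int)) : Decidable (Spec_produce_permutable_plus_minus permutable out) := by unfold Spec_produce_permutable_plus_minus; infer_instance

-- ===== CLAIM (what is proved, stated in full; the proofs are below) =====
def Claim_equal_produce_permutable_plus_minus : Prop := ∀ (permutable : List Int), Dom_produce_permutable_plus_minus permutable → Pre_produce_permutable_plus_minus permutable → Spec_produce_permutable_plus_minus permutable (produce_permutable_plus_minus permutable)

-- ===== LEMMAS AND PROOFS =====
theorem pvRange16 : PySem.List.pyRange 0 16 1 = [0,1,2,3,4,5,6,7,8,9,10,11,12,13,14,15] := by decide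
theorem pvRange4 : PySem.List.pyRange 0 4 1 = [0,1,2,3] := by decide

-- ===== VERDICT (by name: the statement is the Claim_ definition above) =====
theorem produce_permutable_plus_minus_spec : Claim_equal_produce_permutable_plus_minus := by
  intro p _ _
  unfold Spec_produce_permutable_plus_minus
  simp [produce_permutable_plus_minus, produce_permutable_plus_minus_alt,
        pvRange16, pvRange4, pvBitSign, PySem.Int.floordiv, PySem.Int.mod, List.foldl]
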